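-- pv_equiv track=rewrite | github.com/RafaelAzambuja/CoAzRMap | utils/common.py | fix_port_list
-- ===== SOURCE A (Python) =====
-- def fix_port_list(port_list):
--
--     '''
--         Instancias e portList seguem da forma:
--         xx xx xx xx xx..., onde cada par de hexadecimais representa um grupo de oito porta no switch.
--         e cada posição na hex-string é equivalente a um indice de interface. Convertendo para binário teria-se algo como:
--         1011011011110111011101. Quando 1, a interface (porta) seria "positivo". Por exemplo, se este é o portList de interfaces que pertencem
--         a vlan 10, todas as porta setadas em '1' pertencem a vlan 10.
--         O problema é que cada grupo de 8 porta está invertido. Pegando o mesmo exemplo temos: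
--         10110110 11110111 01110110
--         O primeiro campo equivale as porta de 1 à 8, porém na ordem inversa. O segundo campo às portas de 9 à 16, e assim pro diante.
--         O problema é que a primeira posição, por exemplo, do priemiro campo equivale na verdade a porta 8, e a ultima posição, a porta 1.
--     '''
--
--     offset = 1
--     res = ""
--
--     for j in port_list:
--         res += str(bin(int(j, 16))[2:].zfill(8))+" "
--
--     port_index_vlan = ""
--     res = res.split()
--
--     for j in res:
--         j = j[::-1]
--         for i in range(0, len(j)):
--             if j[i] == '1':
--                 port_index_vlan += str(int(i) + offset)+" "
--         offset += 8
--
--     return port_index_vlan.split()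
-- ===== SOURCE B (Python) =====
-- # table: for each byte value, the indices of its set bits (ascending)
-- _BITS = [[i for i in range(8) if (b >> i) & 1] for b in range(256)]
--
-- def fix_port_list(port_list):
--     out = []
--     for pos, token in enumerate(port_list):
--         v = int(token, 16)
--         nbytes = max(1, (v.bit_length() + 7) // 8)
--         base = 8 * pos + 1
--         for k in range(nbytes):
--             for i in _BITS[(v >> (8 * k)) & 0xFF]:
--                 out.append(str(base + 8 * k + i))
--     return out
-- ===== Notes on version B (the rewrite author's own statement) =====
-- stated objective: alternative
-- what changed: B precomputes a 256-entry table mapping each byte value to its set-bit indices and decomposes each token's value into bytes, appending table lookups shifted by the byte position, instead of A's pipeline of joining zero-filled binary strings, splitting, reversing each block and scanning its characters.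
-- outside the precondition, e.g. on fix_port_list(['-1']): A returns ['1'], B returns ['1', '2', '3', '4', '5', '6', '7', '8']
import Mathlib
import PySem

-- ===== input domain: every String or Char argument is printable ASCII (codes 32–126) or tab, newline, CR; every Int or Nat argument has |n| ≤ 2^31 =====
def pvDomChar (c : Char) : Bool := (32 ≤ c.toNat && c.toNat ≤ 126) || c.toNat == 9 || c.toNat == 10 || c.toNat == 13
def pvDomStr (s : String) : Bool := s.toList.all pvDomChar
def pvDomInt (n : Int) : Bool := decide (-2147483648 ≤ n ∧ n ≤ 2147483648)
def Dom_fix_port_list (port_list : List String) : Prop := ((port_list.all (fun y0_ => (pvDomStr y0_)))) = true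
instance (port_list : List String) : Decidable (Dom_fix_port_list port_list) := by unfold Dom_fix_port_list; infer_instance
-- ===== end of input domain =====

set_option maxHeartbeats 1000000


-- B replaces A's join-binary-string / split / substring-reverse pipeline by a precomputed
-- 256-entry byte→set-bit-indices table and a byte decomposition of each token's value
-- (objective: alternative algorithm of the same cost class).

-- ===== PORT A =====
-- literal port of A: first loop builds res = "<zfill(bin(int(j,16))[2:],8)> " per token, splits on
-- whitespace, second loop reverses each block and scans chars, then splits the number string.
def fix_port_list (port_list : List String) : List String :=
  -- offset = 1 ; res = ""  ; res += str(bin(int(j,16))[2:].zfill(8)) + " "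
  let res : List Char :=
    port_list.foldl (fun acc j =>
      acc ++ (PySem.Chars.zfill
        (PySem.List.slice (PySem.Int.toBinChars0b ((PySem.Int.ofStrBase? j 16).getD 0)) (some 2) none) 8)
        ++ [' ']) []
  -- res = res.split()
  let res2 : List (List Char) := PySem.Chars.split₀ res
  -- second loop, state = (port_index_vlan, offset)
  let st : List Char × Int :=
    res2.foldl (fun st j =>
      let jr : List Char := (PySem.List.slice? j none none (-1)).getD []   -- j = j[::-1]
      let inner : List Char :=
        (PySem.List.pyRange 0 (jr.length : Int) 1).foldl (fun acc i =>
          if PySem.List.pyGetD jr i ' ' = '1'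
          then acc ++ (PySem.Int.toChars (i + st.2)) ++ [' ']     -- port_index_vlan += str(int(i)+offset)+" "
          else acc) st.1
      (inner, st.2 + 8)) ([], 1)
  -- return port_index_vlan.split()
  (PySem.Chars.split₀ st.1).map String.ofList

-- ===== PORT B =====
-- port of Source B: _BITS = [[i for i in range(8) if (b >> i) & 1] for b in range(256)]
def pvBITS : List (List Nat) :=
  (List.range 256).map (fun b => (List.range 8).filter (fun i => (b >>> i) &&& 1 != 0))

-- one pass over enumerate(port_list); per token, byte decomposition + table lookups.
-- bit_length → PySem.Int.bitLength, (v >> 8k) & 0xFF → PySem.Int.band (exact, incl. negatives).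
def fix_port_list_alt (port_list : List String) : List String :=
  (PySem.List.enumerate port_list 0).foldl (fun (out : List String) pt =>
    let v : Int := (PySem.Int.ofStrBase? pt.2 16).getD 0         -- v = int(token, 16)
    let nbytes : Nat := max 1 ((PySem.Int.bitLength v + 7) / 8)  -- max(1, (v.bit_length()+7)//8)
    let base : Int := 8 * pt.1 + 1                               -- base = 8*pos + 1
    (List.range nbytes).foldl (fun out (k : Nat) =>
      (pvBITS.getD (PySem.Int.band (v >>> (8 * k)) 255).toNat []).foldl (fun out (i : Nat) =>
        out ++ [PySem.Int.toStr (base + 8 * (k : Int) + (i : Int))]) out) out) []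

-- ===== PRECONDITION & SPEC =====
-- Pre_ excludes tokens that are not valid base-16 integer literals (A raises ValueError there) and
-- tokens with a negative value, where A's returned positions come from slicing bin()'s "-0b" prefix
-- as if it were digits — an accident of A's string slicing that no caller would specify.
def Pre_fix_port_list (port_list : List String) : Prop :=
  (port_list.all (fun s => 0 ≤ (PySem.Int.ofStrBase? s 16).getD (-1))) = true
instance (port_list : List String) : Decidable (Pre_fix_port_list port_list) := by
  unfold Pre_fix_port_list; infer_instance
def pvWitness_fix_port_list : List String := ["ff", "3"]
def Spec_fix_port_list (port_list : List String) (out : List String) : Prop := out = fix_port_list_alt port_list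
instance (port_list : List String) (out : List String) : Decidable (Spec_fix_port_list port_list out) := by unfold Spec_fix_port_list; infer_instance

-- ===== CLAIM (what is proved, stated in full; the proofs are below) =====
def Claim_equal_fix_port_list : Prop := ∀ (port_list : List String), Dom_fix_port_list port_list → Pre_fix_port_list port_list → Spec_fix_port_list port_list (fix_port_list port_list)

-- ===== LEMMAS AND PROOFS =====

-- the bit character the reversed zero-filled binary string carries at position i
def pvBitChar (v : Nat) (i : Nat) : Char := if v.testBit i then '1' else '0'

-- the number strings (as char lists) one token with value v contributes at a given offset
def pvNumTok (v : Nat) (off : Int) : List (List Char) :=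
  ((List.range (max 8 v.size)).filter (fun i => v.testBit i)).map
    (fun (i : Nat) => PySem.Int.toChars ((i : Int) + off))

-- the number strings all tokens contribute, offsets advancing by 8
def pvNums : List Nat → Int → List (List Char)
  | [], _ => []
  | v :: vs, off => pvNumTok v off ++ pvNums vs (off + 8)

-- token value as a Nat (Pre_ gives 0 ≤ getD 0)
def pvVal (s : String) : Nat := ((PySem.Int.ofStrBase? s 16).getD 0).toNat

theorem pvDigits01 (v : Nat) : ∀ c ∈ Nat.toDigits 2 v, c = '0' ∨ c = '1' := by
  induction v using Nat.strong_induction_on with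
  | _ v ih =>
    by_cases h : v < 2
    · interval_cases v <;> simp [Nat.toDigits_of_lt_base, Nat.digitChar]
    · rw [Nat.toDigits_of_base_le (by norm_num) (by omega)]
      intro c hc
      rcases List.mem_append.mp hc with hc | hc
      · exact ih (v / 2) (by omega) c hc
      · have h2 : v % 2 = 0 ∨ v % 2 = 1 := by omega
        simp only [List.mem_singleton] at hc
        rcases h2 with h2 | h2 <;> simp [hc, h2, Nat.digitChar]

theorem pvGetRev (v i : Nat) (hi : i < (Nat.toDigits 2 v).length) :
    (Nat.toDigits 2 v).reverse.getD i ' ' = pvBitChar v i := by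
  induction v using Nat.strong_induction_on generalizing i with
  | _ v ih =>
    by_cases h : v < 2
    · rw [Nat.toDigits_of_lt_base h] at hi ⊢
      simp at hi
      subst hi
      interval_cases v <;> simp [pvBitChar, Nat.digitChar]
    · rw [Nat.toDigits_of_base_le (by norm_num) (by omega)] at hi ⊢
      rw [List.reverse_append]
      simp only [List.reverse_singleton, List.singleton_append]
      cases i with
      | zero =>
        have h2 : v % 2 = 0 ∨ v % 2 = 1 := by omega
        rcases h2 with h2 | h2 <;>
          simp [h2, Nat.digitChar, pvBitChar, Nat.testBit_zero]
      | succ k =>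
        simp only [List.getD_cons_succ]
        have hk : k < (Nat.toDigits 2 (v / 2)).length := by
          simp at hi; omega
        rw [ih (v / 2) (by omega) k hk]
        simp [pvBitChar, Nat.testBit_add_one]

theorem pvLenEq (v : Nat) : max 8 (Nat.toDigits 2 v).length = max 8 v.size := by
  rcases Nat.eq_zero_or_pos v with h | h
  · subst h; simp [Nat.toDigits_zero, Nat.size_zero]
  · have hL : (Nat.toDigits 2 v).length = v.size := by
      apply le_antisymm
      · exact (Nat.length_toDigits_le_iff (by norm_num) (Nat.size_pos.mpr h)).mpr
          (Nat.lt_size_self v)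
      · exact Nat.size_le.mpr ((Nat.length_toDigits_le_iff (by norm_num)
          Nat.length_toDigits_pos).mp le_rfl)
    rw [hL]

-- zfill of the binary digit string, in closed form
theorem pvZfillEq (v : Nat) :
    PySem.Chars.zfill (Nat.toDigits 2 v) 8
      = List.replicate (8 - (Nat.toDigits 2 v).length) '0' ++ Nat.toDigits 2 v := by
  unfold PySem.Chars.zfill
  by_cases h8 : (8 : Int) ≤ ((Nat.toDigits 2 v).length : Int)
  · rw [if_pos h8]
    have : 8 - (Nat.toDigits 2 v).length = 0 := by omega
    simp [this]
  · rw [if_neg h8]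
    rcases hd : Nat.toDigits 2 v with _ | ⟨c, rest⟩
    · exact absurd (hd ▸ Nat.length_toDigits_pos) (by simp)
    · have hc : c = '0' ∨ c = '1' := pvDigits01 v c (by rw [hd]; exact List.mem_cons_self)
      have hne : ¬(c = '+' ∨ c = '-') := by rcases hc with h | h <;> subst h <;> decide
      simp only [if_neg hne]
      rw [← hd]
      simp

theorem pvRevEq (v : Nat) :
    (PySem.Chars.zfill (Nat.toDigits 2 v) 8).reverse
      = (List.range (max 8 v.size)).map (pvBitChar v) := by
  rw [pvZfillEq, List.reverse_append, List.reverse_replicate]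
  set L := (Nat.toDigits 2 v).length with hLdef
  have hvL : v < 2 ^ L :=
    (Nat.length_toDigits_le_iff (by norm_num) Nat.length_toDigits_pos).mp le_rfl
  apply List.ext_getElem
  · simp [← pvLenEq v, hLdef]; omega
  · intro i h1 h2
    simp only [List.length_append, List.length_reverse, List.length_replicate] at h1
    by_cases hiL : i < L
    · rw [List.getElem_append_left (by simpa using hiL)]
      have := pvGetRev v i (hLdef ▸ hiL)
      rw [List.getD_eq_getElem _ _ (by simpa using hiL)] at this
      simp only [List.getElem_map, List.getElem_range]
      exact this
    · rw [List.getElem_append_right (by simpa using hiL)]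
      simp only [List.getElem_replicate, List.getElem_map, List.getElem_range]
      have hbit : v.testBit i = false := by
        apply Nat.testBit_eq_false_of_lt
        calc v < 2 ^ L := hvL
          _ ≤ 2 ^ i := Nat.pow_le_pow_right (by norm_num) (by omega)
      simp [pvBitChar, hbit]

-- getD on a mapped range
theorem pvGetDMapRange {α : Type} (f : Nat → α) (n i : Nat) (d : α) (h : i < n) :
    ((List.range n).map f).getD i d = f i := by
  rw [List.getD_eq_getElem _ _ (by simpa using h)]
  simp

-- conditional flatMap = flatMap over filter
theorem pvFlatMapIf {α β : Type} (p : α → Bool) (g : α → List β) (l : List α) :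
    (l.flatMap fun x => if p x then g x else []) = (l.filter p).flatMap g := by
  induction l with
  | nil => simp
  | cons x xs ih =>
    by_cases h : p x <;> simp [List.flatMap_cons, h, ih]

-- A's inner per-block loop in closed form
theorem pvInnerA (v : Nat) (off : Int) (acc : List Char) :
    (PySem.List.pyRange 0 ((((List.range (max 8 v.size)).map (pvBitChar v)).length : Nat) : Int) 1).foldl
      (fun acc i =>
        if PySem.List.pyGetD ((List.range (max 8 v.size)).map (pvBitChar v)) i ' ' = '1'
        then acc ++ (PySem.Int.toChars (i + off)) ++ [' '] else acc) acc
      = acc ++ ((pvNumTok v off).map (fun cs => cs ++ [' '])).flatten := by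
  set n := max 8 v.size with hn
  have hlen : ((List.range n).map (pvBitChar v)).length = n := by simp
  rw [hlen, PySem.List.pyRange_zero_natCast, List.foldl_map]
  have hcongr :
      (List.range n).foldl
        (fun acc (k : Nat) =>
          if PySem.List.pyGetD ((List.range n).map (pvBitChar v)) (↑k) ' ' = '1'
          then acc ++ (PySem.Int.toChars (↑k + off)) ++ [' '] else acc) acc
      = (List.range n).foldl
        (fun acc (k : Nat) =>
          acc ++ (if v.testBit k then PySem.Int.toChars (↑k + off) ++ [' '] else [])) acc := by
    apply PySem.List.foldl_congr_mem
    intro acc' k hk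
    have hk' : k < n := List.mem_range.mp hk
    rw [PySem.List.pyGetD_natCast, pvGetDMapRange _ _ _ _ hk']
    by_cases hb : v.testBit k <;> simp [pvBitChar, hb, List.append_assoc]
  rw [hcongr, PySem.List.foldl_append_eq_flatMap]
  congr 1
  rw [pvFlatMapIf]
  unfold pvNumTok
  rw [List.map_map, ← List.flatMap_def]
  simp [hn, Function.comp_def]

-- a digit character is not whitespace
theorem pvIsspaceDigit (c : Char) (h : c.isDigit = true) : PySem.Chars.isspace c = false := by
  simp [Char.isDigit, UInt32.le_iff_toNat_le] at h
  have h' : 48 ≤ c.toNat ∧ c.toNat ≤ 57 := h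
  unfold PySem.Chars.isspace
  simp only [Bool.or_eq_false_iff, Bool.and_eq_false_iff, decide_eq_false_iff_not]
  omega

-- split₀.go walks through a whitespace-free prefix accumulating it into cur
theorem pvGoSkip (s t cur : List Char) (acc : List (List Char))
    (h : ∀ c ∈ s, PySem.Chars.isspace c = false) :
    PySem.Chars.split₀.go (s ++ t) cur acc = PySem.Chars.split₀.go t (s.reverse ++ cur) acc := by
  induction s generalizing cur with
  | nil => simp
  | cons c s ih =>
    have hc := h c List.mem_cons_self
    simp only [List.cons_append, PySem.Chars.split₀.go, hc]
    rw [List.reverse_cons, List.append_assoc, List.singleton_append]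
    exact ih (c :: cur) (fun d hd => h d (List.mem_cons_of_mem _ hd))

-- split₀.go on space-terminated whitespace-free nonempty blocks returns the blocks
theorem pvGoBlocks (nums : List (List Char)) (acc : List (List Char))
    (h : ∀ s ∈ nums, s ≠ [] ∧ ∀ c ∈ s, PySem.Chars.isspace c = false) :
    PySem.Chars.split₀.go ((nums.map (fun cs => cs ++ [' '])).flatten) [] acc
      = acc.reverse ++ nums := by
  induction nums generalizing acc with
  | nil => simp [PySem.Chars.split₀.go]
  | cons n ns ih =>
    obtain ⟨hne, hws⟩ := h n List.mem_cons_self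
    simp only [List.map_cons, List.flatten_cons, List.append_assoc, List.singleton_append]
    rw [pvGoSkip _ _ _ _ hws]
    have hsp : PySem.Chars.isspace ' ' = true := by decide
    have hemp : (n.reverse ++ ([] : List Char)).isEmpty = false := by
      simp [hne]
    simp only [PySem.Chars.split₀.go, hsp, hemp, if_true, Bool.false_eq_true, if_false]
    rw [show ((n.reverse ++ ([] : List Char)).reverse : List Char) = n by simp]
    rw [ih (n :: acc) (fun s hs => h s (List.mem_cons_of_mem _ hs))]
    simp

theorem pvSplitBlocks (nums : List (List Char))
    (h : ∀ s ∈ nums, s ≠ [] ∧ ∀ c ∈ s, PySem.Chars.isspace c = false) :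
    PySem.Chars.split₀ ((nums.map (fun cs => cs ++ [' '])).flatten) = nums := by
  unfold PySem.Chars.split₀
  rw [pvGoBlocks _ _ h]
  simp

-- a positive integer's decimal characters: nonempty, no whitespace
theorem pvTokGood (x : Int) (hx : 0 < x) :
    PySem.Int.toChars x ≠ [] ∧ ∀ c ∈ PySem.Int.toChars x, PySem.Chars.isspace c = false := by
  unfold PySem.Int.toChars
  rw [if_neg (by omega)]
  refine ⟨?_, ?_⟩
  · intro hc
    have := Nat.length_toDigits_pos (b := 10) (n := x.toNat)
    simp [hc] at this
  · intro c hc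
    exact pvIsspaceDigit c (Nat.isDigit_of_mem_toDigits (by norm_num) (by norm_num) hc)

theorem pvNumsGood : ∀ (ws : List Nat) (off : Int), 1 ≤ off →
    ∀ s ∈ pvNums ws off, s ≠ [] ∧ ∀ c ∈ s, PySem.Chars.isspace c = false := by
  intro ws
  induction ws with
  | nil => intro off _ s hs; simp [pvNums] at hs
  | cons w ws ih =>
    intro off hoff s hs
    rw [pvNums] at hs
    rcases List.mem_append.mp hs with hs | hs
    · unfold pvNumTok at hs
      obtain ⟨i, _, rfl⟩ := List.mem_map.mp hs
      exact pvTokGood _ (by omega)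
    · exact ih (off + 8) (by omega) s hs

-- the zero-filled binary blocks: nonempty, chars are '0'/'1', no whitespace
theorem pvBlockGood (w : Nat) :
    PySem.Chars.zfill (Nat.toDigits 2 w) 8 ≠ [] ∧
      ∀ c ∈ PySem.Chars.zfill (Nat.toDigits 2 w) 8, PySem.Chars.isspace c = false := by
  rw [pvZfillEq]
  refine ⟨?_, ?_⟩
  · intro hc
    have := Nat.length_toDigits_pos (b := 2) (n := w)
    simp [List.append_eq_nil_iff] at hc
    simp [hc.2] at this
  · intro c hc
    rcases List.mem_append.mp hc with hc | hc
    · rw [List.eq_of_mem_replicate hc]; decide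
    · rcases pvDigits01 w c hc with rfl | rfl <;> decide

-- A's second loop over the binary blocks, in closed form
theorem pvLoopA (ws : List Nat) (off : Int) (acc : List Char) :
    (((ws.map (fun w => PySem.Chars.zfill (Nat.toDigits 2 w) 8)).foldl
      (fun st j =>
        let jr : List Char := (PySem.List.slice? j none none (-1)).getD []
        let inner : List Char :=
          (PySem.List.pyRange 0 (jr.length : Int) 1).foldl (fun acc i =>
            if PySem.List.pyGetD jr i ' ' = '1'
            then acc ++ (PySem.Int.toChars (i + st.2)) ++ [' ']
            else acc) st.1
        (inner, st.2 + 8)) (acc, off)).1)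
      = acc ++ ((pvNums ws off).map (fun cs => cs ++ [' '])).flatten := by
  induction ws generalizing off acc with
  | nil => simp [pvNums]
  | cons w ws ih =>
    have hjr : (PySem.List.slice? (PySem.Chars.zfill (Nat.toDigits 2 w) 8) none none (-1)).getD []
        = (List.range (max 8 w.size)).map (pvBitChar w) := by
      rw [PySem.List.slice?_none_none_neg_one]
      simp [pvRevEq]
    simp only [List.map_cons, List.foldl_cons, hjr]
    rw [ih, pvInnerA]
    simp [pvNums, List.append_assoc]

-- A in closed form (under Pre_)
theorem pvAEq (pl : List String)
    (h : ∀ s ∈ pl, 0 ≤ (PySem.Int.ofStrBase? s 16).getD (-1)) :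
    fix_port_list pl = (pvNums (pl.map pvVal) 1).map String.ofList := by
  have hres : (pl.foldl (fun acc j =>
      acc ++ (PySem.Chars.zfill
        (PySem.List.slice (PySem.Int.toBinChars0b ((PySem.Int.ofStrBase? j 16).getD 0)) (some 2) none) 8)
        ++ [' ']) [])
      = ((((pl.map pvVal).map (fun w => PySem.Chars.zfill (Nat.toDigits 2 w) 8)).map
          (fun cs => cs ++ [' '])).flatten) := by
    simp only [List.append_assoc]
    rw [PySem.List.foldl_append_eq_flatMap, List.nil_append, List.map_map, List.map_map,
      ← List.flatMap_def, List.flatMap_def, List.flatMap_def]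
    refine congrArg List.flatten ?_
    apply List.map_congr_left
    intro j hj
    have hj' := h j hj
    rcases ho : PySem.Int.ofStrBase? j 16 with _ | v
    · rw [ho] at hj'; simp at hj'
    · rw [ho] at hj'
      simp only [Option.getD_some] at hj'
      simp only [Option.getD_some, Function.comp_def]
      unfold PySem.Int.toBinChars0b
      rw [if_neg (by omega)]
      rw [show (2 : Int) = ((2 : Nat) : Int) from by norm_num, PySem.List.slice_from_natCast]
      simp [pvVal, ho]
  simp only [fix_port_list]
  rw [hres]
  rw [pvSplitBlocks _ (fun s hs => by
    obtain ⟨w, _, rfl⟩ := List.mem_map.mp hs; exact pvBlockGood w)]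
  rw [pvLoopA]
  rw [List.nil_append]
  rw [pvSplitBlocks _ (pvNumsGood _ 1 le_rfl)]

-- ============ B-side lemmas ============

-- bitLength of a cast Nat is Nat.size
theorem pvBitLenEq (w : Nat) : PySem.Int.bitLength (w : Int) = w.size := by
  rcases Nat.eq_zero_or_pos w with h | h
  · subst h; simp [PySem.Int.bitLength_zero]
  · apply le_antisymm
    · by_contra hle
      have hlt : w.size < PySem.Int.bitLength (w : Int) := by omega
      have h1 : 2 ^ (PySem.Int.bitLength (w : Int) - 1) ≤ (w : Int).natAbs :=
        PySem.Int.two_pow_bitLength_le _ (Int.natCast_ne_zero.mpr (by omega))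
      have h2 : w < 2 ^ w.size := Nat.lt_size_self w
      have h3 : 2 ^ w.size ≤ 2 ^ (PySem.Int.bitLength (w : Int) - 1) :=
        Nat.pow_le_pow_right (by norm_num) (by omega)
      simp only [Int.natAbs_natCast] at h1
      omega
    · exact Nat.size_le.mpr (by simpa using PySem.Int.lt_two_pow_bitLength (w : Int))

-- the table entry for b < 256 is the list of set-bit indices below 8
theorem pvBITSEq (b : Nat) (hb : b < 256) :
    pvBITS.getD b [] = (List.range 8).filter (fun i => b.testBit i) := by
  unfold pvBITS
  rw [pvGetDMapRange _ _ _ _ hb]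
  apply List.filter_congr
  intro i _
  show ((b >>> i) &&& 1 != 0) = b.testBit i
  simp [Nat.testBit, Nat.and_comm]

-- a byte of w, bit-tested, is a bit of w
theorem pvByteBit (w k i : Nat) (hi : i < 8) :
    ((w >>> (8 * k)) &&& 255).testBit i = w.testBit (8 * k + i) := by
  rw [Nat.testBit_and, Nat.testBit_shiftRight]
  have h255 : Nat.testBit 255 i = true := by interval_cases i <;> decide
  simp [h255]

-- filter testBit over any range long enough equals the canonical one
theorem pvFilterRangeTestBit (w : Nat) (m n : Nat) (hm : w.size ≤ m) (hmn : m ≤ n) :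
    (List.range n).filter (fun i => w.testBit i) = (List.range m).filter (fun i => w.testBit i) := by
  rw [show n = m + (n - m) from by omega, List.range_add, List.filter_append]
  have : ((List.range (n - m)).map (fun i => m + i)).filter (fun i => w.testBit i) = [] := by
    rw [List.filter_eq_nil_iff]
    intro a ha
    obtain ⟨i, _, rfl⟩ := List.mem_map.mp ha
    have : w.testBit (m + i) = false := by
      apply Nat.testBit_eq_false_of_lt
      calc w < 2 ^ w.size := Nat.lt_size_self w
        _ ≤ 2 ^ (m + i) := Nat.pow_le_pow_right (by norm_num) (by omega)
    simp [this]
  rw [this, List.append_nil]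

-- chunked ranges: flatMap of per-byte filtered windows = filter of the full range
theorem pvChunkRange (p : Nat → Bool) (n : Nat) :
    (List.range n).flatMap (fun k => ((List.range 8).map (fun i => 8 * k + i)).filter p)
      = (List.range (8 * n)).filter p := by
  induction n with
  | zero => simp
  | succ n ih =>
    rw [show List.range (n + 1) = List.range n ++ [n] from List.range_succ,
      List.flatMap_append, ih,
      show 8 * (n + 1) = 8 * n + 8 from by ring,
      show List.range (8 * n + 8) = List.range (8 * n) ++ (List.range 8).map (fun i => 8 * n + i)
        from List.range_add, List.filter_append]
    simp

-- the table lookup for byte k of w, rendered, equals w's bits in window [8k, 8k+8) rendered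
theorem pvChunkEq (w k : Nat) (base : Int) :
    ((pvBITS.getD ((w >>> (8 * k)) &&& 255) []).map
        (fun (i : Nat) => PySem.Int.toStr (base + 8 * (k : Int) + (i : Int))))
      = (((List.range 8).map (fun i => 8 * k + i)).filter (fun i => w.testBit i)).map
          (fun (j : Nat) => PySem.Int.toStr ((j : Int) + base)) := by
  rw [pvBITSEq _ (lt_of_le_of_lt (Nat.and_le_right) (by norm_num)), List.filter_map, List.map_map]
  have hfilter : (List.range 8).filter (fun i => ((w >>> (8 * k)) &&& 255).testBit i)
      = (List.range 8).filter ((fun i => w.testBit i) ∘ (fun i => 8 * k + i)) := by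
    apply List.filter_congr
    intro i hi
    simp only [Function.comp]
    rw [pvByteBit w k i (List.mem_range.mp hi)]
  rw [hfilter]
  apply List.map_congr_left
  intro i hi
  simp only [Function.comp]
  congr 1
  push_cast
  ring

-- B's per-token loop in closed form (for a nonnegative token value w)
theorem pvInnerB (w : Nat) (base : Int) (acc : List String) :
    (List.range (max 1 ((PySem.Int.bitLength (w : Int) + 7) / 8))).foldl (fun out (k : Nat) =>
      (pvBITS.getD (PySem.Int.band ((w : Int) >>> (8 * k)) 255).toNat []).foldl (fun out (i : Nat) =>
        out ++ [PySem.Int.toStr (base + 8 * (k : Int) + (i : Int))]) out) acc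
      = acc ++ (pvNumTok w base).map String.ofList := by
  rw [pvBitLenEq]
  set nb := max 1 ((w.size + 7) / 8) with hnb
  have hbyte : ∀ k : Nat, (PySem.Int.band ((w : Int) >>> (8 * k)) 255).toNat
      = (w >>> (8 * k)) &&& 255 := by
    intro k
    rw [show ((w : Int) >>> (8 * k)) = ((w >>> (8 * k) : Nat) : Int) from by
        simp [Int.natCast_shiftRight],
      show (255 : Int) = ((255 : Nat) : Int) from rfl, PySem.Int.band_natCast]
    simp
  have hbody : ∀ (out : List String) (k : Nat), k ∈ List.range nb →
      ((pvBITS.getD (PySem.Int.band ((w : Int) >>> (8 * k)) 255).toNat []).foldl (fun out (i : Nat) =>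
        out ++ [PySem.Int.toStr (base + 8 * (k : Int) + (i : Int))]) out)
      = out ++ ((((List.range 8).map (fun i => 8 * k + i)).filter (fun i => w.testBit i)).map
          (fun (j : Nat) => PySem.Int.toStr ((j : Int) + base))) := by
    intro out k _
    rw [hbyte k, PySem.List.foldl_append_singleton_eq_map, pvChunkEq]
  rw [PySem.List.foldl_congr_mem _ _ _ _ hbody, PySem.List.foldl_append_eq_flatMap]
  congr 1
  rw [← List.map_flatMap, pvChunkRange]
  rw [pvFilterRangeTestBit w (max 8 w.size) (8 * nb) (by omega) (by
    have h2 : (w.size + 7) / 8 ≤ nb := by rw [hnb]; omega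
    omega)]
  unfold pvNumTok
  rw [List.map_map]
  apply List.map_congr_left
  intro j _
  simp only [Function.comp]
  rw [← PySem.Int.toList_toStr, String.ofList_toList]

-- B's outer loop over enumerate, in closed form (under Pre_)
theorem pvLoopB (pl : List String) (s : Int) (acc : List String)
    (h : ∀ t ∈ pl, 0 ≤ (PySem.Int.ofStrBase? t 16).getD (-1)) :
    ((PySem.List.enumerate pl s).foldl (fun (out : List String) pt =>
      let v : Int := (PySem.Int.ofStrBase? pt.2 16).getD 0
      let nbytes : Nat := max 1 ((PySem.Int.bitLength v + 7) / 8)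
      let base : Int := 8 * pt.1 + 1
      (List.range nbytes).foldl (fun out (k : Nat) =>
        (pvBITS.getD (PySem.Int.band (v >>> (8 * k)) 255).toNat []).foldl (fun out (i : Nat) =>
          out ++ [PySem.Int.toStr (base + 8 * (k : Int) + (i : Int))]) out) out) acc)
    = acc ++ (pvNums (pl.map pvVal) (8 * s + 1)).map String.ofList := by
  induction pl generalizing s acc with
  | nil => simp [pvNums, PySem.List.enumerate_nil]
  | cons t pl ih =>
    rw [PySem.List.enumerate_cons, List.foldl_cons]
    have ht := h t List.mem_cons_self
    have hv : (PySem.Int.ofStrBase? t 16).getD 0 = ((pvVal t : Nat) : Int) := by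
      rcases ho : PySem.Int.ofStrBase? t 16 with _ | v
      · rw [ho] at ht; simp at ht
      · rw [ho] at ht
        simp only [Option.getD_some] at ht ⊢
        simp [pvVal, ho, Int.toNat_of_nonneg ht]
    simp only [hv]
    rw [pvInnerB (pvVal t) (8 * s + 1) acc]
    rw [ih (s + 1) _ (fun u hu => h u (List.mem_cons_of_mem _ hu))]
    simp only [List.map_cons, pvNums, List.map_append]
    rw [show 8 * (s + 1) + 1 = 8 * s + 1 + 8 from by ring]
    simp [List.append_assoc]

-- B in closed form (under Pre_)
theorem pvBEq (pl : List String)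
    (h : ∀ s ∈ pl, 0 ≤ (PySem.Int.ofStrBase? s 16).getD (-1)) :
    fix_port_list_alt pl = (pvNums (pl.map pvVal) 1).map String.ofList := by
  unfold fix_port_list_alt
  rw [pvLoopB pl 0 [] h]
  norm_num

-- ===== VERDICT (by name: the statement is the Claim_ definition above) =====
theorem fix_port_list_spec : Claim_equal_fix_port_list := by
  intro pl _ hpre
  unfold Spec_fix_port_list
  simp only [Pre_fix_port_list, List.all_eq_true, decide_eq_true_eq] at hpre
  rw [pvAEq pl hpre, pvBEq pl hpre]
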